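-- pv_equiv track=rewrite | github.com/wrayta/Python-Coding-Bat | make_chocolate.py | make_chocolate
-- ===== SOURCE A (Python) =====
-- def make_chocolate(small, big, goal):
--   while big * 5 > goal and big > 0:
--     big -= 1
--
--   num_of_small_bars_required = goal - (big * 5)
--
--   if(small >= num_of_small_bars_required):
--     return num_of_small_bars_required
--   else:
--     return -1
-- ===== SOURCE B (Python) =====
-- def make_chocolate(small, big, goal):
--     n = goal - 5 * min(big, max(0, goal // 5))
--     return n if small >= n else -1
-- ===== Notes on version B (the rewrite author's own statement) =====
-- stated objective: simpler
-- what changed: Replaces the decrement-until-fit loop over big with a closed-form arithmetic computation min(big, max(0, goal // 5)) of the number of big bars used.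
import Mathlib
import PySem

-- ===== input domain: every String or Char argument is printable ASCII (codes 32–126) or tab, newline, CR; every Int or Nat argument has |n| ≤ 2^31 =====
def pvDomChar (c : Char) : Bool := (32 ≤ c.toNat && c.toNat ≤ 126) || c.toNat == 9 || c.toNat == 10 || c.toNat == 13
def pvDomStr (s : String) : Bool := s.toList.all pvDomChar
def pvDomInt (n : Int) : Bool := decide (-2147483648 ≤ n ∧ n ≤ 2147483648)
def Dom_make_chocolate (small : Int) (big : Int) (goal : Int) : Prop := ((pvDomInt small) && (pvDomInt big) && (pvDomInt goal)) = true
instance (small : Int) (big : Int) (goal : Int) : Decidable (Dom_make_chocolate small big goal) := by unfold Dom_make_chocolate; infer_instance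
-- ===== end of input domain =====

-- B replaces A's decrement loop over big with a closed-form min/max arithmetic expression (simpler, O(1)).

-- ===== PORT A =====
-- the while loop: decrement big while big * 5 > goal and big > 0
def make_chocolate_loop (big goal : Int) : Int :=
  if big * 5 > goal ∧ big > 0 then make_chocolate_loop (big - 1) goal else big
termination_by big.toNat
decreasing_by omega

def make_chocolate (small : Int) (big : Int) (goal : Int) : Int :=
  let big' := make_chocolate_loop big goal
  let num_of_small_bars_required := goal - big' * 5
  if small ≥ num_of_small_bars_required then num_of_small_bars_required else -1

-- ===== PORT B =====
def make_chocolate_alt (small : Int) (big : Int) (goal : Int) : Int :=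
  let n := goal - 5 * min big (max 0 (PySem.Int.floordiv goal 5))
  if small ≥ n then n else -1

-- ===== PRECONDITION & SPEC =====
def Spec_make_chocolate (small : Int) (big : Int) (goal : Int) (out : Int) : Prop := out = make_chocolate_alt small big goal
instance (small : Int) (big : Int) (goal : Int) (out : Int) : Decidable (Spec_make_chocolate small big goal out) := by unfold Spec_make_chocolate; infer_instance

-- ===== CLAIM (what is proved, stated in full; the proofs are below) =====
def Claim_equal_make_chocolate : Prop := ∀ (small : Int) (big : Int) (goal : Int), Dom_make_chocolate small big goal → Spec_make_chocolate small big goal (make_chocolate small big goal)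

-- ===== LEMMAS AND PROOFS =====

-- A's loop computes exactly B's closed form
lemma make_chocolate_loop_eq (big goal : Int) :
    make_chocolate_loop big goal = min big (max 0 (PySem.Int.floordiv goal 5)) := by
  rw [PySem.Int.floordiv_eq_ediv_of_pos (by norm_num : (0:Int) < 5)]
  fun_induction make_chocolate_loop big goal with
  | case1 big h ih =>
      rw [ih]; omega
  | case2 big h =>
      omega

-- ===== VERDICT (by name: the statement is the Claim_ definition above) =====
theorem make_chocolate_spec : Claim_equal_make_chocolate := by
  intro small big goal _
  unfold Spec_make_chocolate make_chocolate make_chocolate_alt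
  rw [make_chocolate_loop_eq]
  ring_nf
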